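-- pv_equiv track=rewrite | github.com/yangmingxuan/pythonalgorithms | arrayandsort/MaximumNumberofBalloons.py | maxNumberOfBalloons2
-- ===== SOURCE A (Python) =====
-- def maxNumberOfBalloons2(text: str) -> int:
--     dct = {'b':0, 'a':0, 'l':0, 'o':0, 'n':0}
--     for ch in text:
--         if ch in dct:
--             dct[ch] += 1
--     dct['l'] //= 2
--     dct['o'] //= 2
--     return min(dct.values())
-- ===== SOURCE B (Python) =====
-- def maxNumberOfBalloons2(text: str) -> int:
--     # Binary search for the largest k such that k "balloon"s are formable.
--     def feasible(k):
--         return all(k * m <= text.count(c)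
--                    for c, m in (('b', 1), ('a', 1), ('l', 2), ('o', 2), ('n', 1)))
--     lo, hi = 0, len(text)
--     while lo < hi:
--         mid = (lo + hi + 1) // 2
--         if feasible(mid):
--             lo = mid
--         else:
--             hi = mid - 1
--     return lo
-- ===== Notes on version B (the rewrite author's own statement) =====
-- stated objective: alternative
-- what changed: Replaced the single-pass frequency table and min-of-values by a binary search on the answer k over [0, len(text)], each candidate k checked for feasibility with per-letter count comparisons.
import Mathlib
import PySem

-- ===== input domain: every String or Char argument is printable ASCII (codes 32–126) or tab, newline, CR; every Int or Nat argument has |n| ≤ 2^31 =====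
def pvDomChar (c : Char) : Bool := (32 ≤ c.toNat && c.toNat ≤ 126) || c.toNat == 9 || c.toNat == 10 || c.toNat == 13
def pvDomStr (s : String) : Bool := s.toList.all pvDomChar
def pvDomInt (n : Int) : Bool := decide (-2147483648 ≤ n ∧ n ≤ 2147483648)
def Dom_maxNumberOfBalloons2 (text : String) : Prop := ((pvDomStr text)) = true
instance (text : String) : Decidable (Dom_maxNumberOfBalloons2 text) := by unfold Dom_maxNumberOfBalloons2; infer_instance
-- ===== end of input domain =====

-- B replaces A's single-pass frequency table by a binary search on the answer over [0, len(text)] with per-letter count feasibility checks (objective: alternative).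


-- ===== PORT A =====
def maxNumberOfBalloons2 (text : String) : Int :=
  let dct : PySem.Dict Char Int :=
    PySem.Dict.ofList [('b', 0), ('a', 0), ('l', 0), ('o', 0), ('n', 0)]
  let dct := text.toList.foldl
    (fun d ch => if d.contains ch then d.modify ch 0 (· + 1) else d) dct
  let dct := dct.insert 'l' (PySem.Int.floordiv (dct.getD 'l' 0) 2)
  let dct := dct.insert 'o' (PySem.Int.floordiv (dct.getD 'o' 0) 2)
  ((PySem.List.min? dct.values (fun y => y)).getD 0)

-- ===== PORT B =====
-- feasible(k): every needed letter occurs at least k * multiplicity times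
def pvFeasible (text : String) (k : Int) : Bool :=
  ([("b", (1 : Int)), ("a", 1), ("l", 2), ("o", 2), ("n", 1)]).all
    (fun p => decide (k * p.2 ≤ (PySem.Str.count text p.1 : Int)))

-- the while-loop of B, as structural recursion on the shrinking interval
def pvSearch (text : String) (lo hi : Int) : Int :=
  if h : lo < hi then
    let mid := PySem.Int.floordiv (lo + hi + 1) 2
    if pvFeasible text mid then pvSearch text mid hi
    else pvSearch text lo (mid - 1)
  else lo
termination_by (hi - lo).toNat
decreasing_by
  · have hb := PySem.Int.floordiv_two_mid_bounds (lo := lo + 1) (hi := hi) (by omega)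
    have : lo + 1 + hi = lo + hi + 1 := by ring
    rw [this] at hb
    omega
  · have hb := PySem.Int.floordiv_two_mid_bounds (lo := lo + 1) (hi := hi) (by omega)
    have : lo + 1 + hi = lo + hi + 1 := by ring
    rw [this] at hb
    omega

def maxNumberOfBalloons2_alt (text : String) : Int :=
  pvSearch text 0 (PySem.Str.len text : Int)

-- ===== PRECONDITION & SPEC =====
def Spec_maxNumberOfBalloons2 (text : String) (out : Int) : Prop := out = maxNumberOfBalloons2_alt text
instance (text : String) (out : Int) : Decidable (Spec_maxNumberOfBalloons2 text out) := by unfold Spec_maxNumberOfBalloons2; infer_instance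

-- ===== CLAIM (what is proved, stated in full; the proofs are below) =====
def Claim_equal_maxNumberOfBalloons2 : Prop := ∀ (text : String), Dom_maxNumberOfBalloons2 text → Spec_maxNumberOfBalloons2 text (maxNumberOfBalloons2 text)

-- ===== LEMMAS AND PROOFS =====

-- the value both programs compute: min(cb, ca, cl//2, co//2, cn)
def pvM (text : String) : Int :=
  min (min (min (min (text.toList.count 'b' : Int) (text.toList.count 'a' : Int))
    (PySem.Int.floordiv (text.toList.count 'l' : Int) 2))
    (PySem.Int.floordiv (text.toList.count 'o' : Int) 2))
    (text.toList.count 'n' : Int)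

-- Python's s.count(c) for a one-character pattern is the plain character count.
theorem pv_count_go_single (c : Char) : ∀ (l : List Char) (fuel acc : Nat), l.length ≤ fuel →
    PySem.Chars.count.go [c] fuel l acc = acc + l.count c := by
  intro l
  induction l with
  | nil => intro fuel acc _; cases fuel <;> simp [PySem.Chars.count.go]
  | cons h t ih =>
    intro fuel acc hle
    cases fuel with
    | zero => simp at hle
    | succ f =>
      simp only [List.length_cons, Nat.succ_le_succ_iff] at hle
      by_cases hc : h = c
      · subst hc
        rw [PySem.Chars.count.go]
        simp only [List.isPrefixOf, Bool.and_true, if_pos, beq_self_eq_true]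
        simp [ih f (acc + 1) hle]
        omega
      · rw [PySem.Chars.count.go]
        simp [List.isPrefixOf, hc, ih f acc hle, Ne.symm hc]

theorem pv_count_single (s : String) (c : Char) (pat : String) (hp : pat.toList = [c]) :
    PySem.Str.count s pat = s.toList.count c := by
  rw [PySem.Str.count_eq, hp, PySem.Chars.count]
  have hgo := pv_count_go_single c s.toList s.toList.length 0 le_rfl
  simpa using hgo

-- The guarded counting loop of A leaves the key set unchanged.
theorem pv_loop_keys (l : List Char) (d : PySem.Dict Char Int) :
    (l.foldl (fun d ch => if d.contains ch then d.modify ch 0 (· + 1) else d) d).keys = d.keys := by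
  induction l generalizing d with
  | nil => rfl
  | cons h t ih =>
    simp only [List.foldl_cons]
    by_cases hc : d.contains h = true
    · rw [if_pos hc, ih]
      rw [PySem.Dict.keys_modify, PySem.Dict.keys_insert_of_contains _ _ hc]
    · rw [if_neg hc, ih]

-- At any key the dict already contains, the loop adds exactly the count of that key in the list.
theorem pv_loop_getD (l : List Char) (d : PySem.Dict Char Int) (v : Char)
    (hv : d.contains v = true) :
    (l.foldl (fun d ch => if d.contains ch then d.modify ch 0 (· + 1) else d) d).getD v 0
      = d.getD v 0 + l.count v := by
  induction l generalizing d with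
  | nil => simp
  | cons h t ih =>
    simp only [List.foldl_cons]
    by_cases hc : d.contains h = true
    · rw [if_pos hc]
      have hcv : (d.modify h 0 (· + 1)).contains v = true := by
        rw [PySem.Dict.contains_modify]; simp [hv]
      rw [ih _ hcv, PySem.Dict.getD_modify]
      by_cases hvh : v = h
      · subst hvh; simp; omega
      · rw [if_neg hvh]; simp [Ne.symm hvh]
    · rw [if_neg hc, ih _ hv]
      have : v ≠ h := by rintro rfl; exact hc hv
      simp [Ne.symm this]

-- Port A computes pvM.
set_option maxRecDepth 8192 in
theorem pvA_eq_pvM (text : String) : maxNumberOfBalloons2 text = pvM text := by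
  unfold maxNumberOfBalloons2
  set d0 : PySem.Dict Char Int :=
    PySem.Dict.ofList [('b', 0), ('a', 0), ('l', 0), ('o', 0), ('n', 0)] with hd0
  set l := text.toList with hl
  set d1 := l.foldl (fun d ch => if d.contains ch then d.modify ch 0 (· + 1) else d) d0 with hd1
  have hcont : ∀ c, c ∈ (['b', 'a', 'l', 'o', 'n'] : List Char) → d0.contains c = true := by
    intro c hc; rw [hd0]; fin_cases hc <;> rfl
  have hget : ∀ c ∈ (['b', 'a', 'l', 'o', 'n'] : List Char), d1.getD c 0 = (l.count c : Int) := by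
    intro c hc
    rw [hd1, pv_loop_getD l d0 c (hcont c hc)]
    have : d0.getD c 0 = 0 := by rw [hd0]; fin_cases hc <;> rfl
    rw [this]; ring
  have hkeys : d1.keys = ['b', 'a', 'l', 'o', 'n'] := by
    rw [hd1, pv_loop_keys, hd0]; rfl
  set d2 := (d1.insert 'l' (PySem.Int.floordiv (d1.getD 'l' 0) 2)) with hd2
  set d3 := (d2.insert 'o' (PySem.Int.floordiv (d2.getD 'o' 0) 2)) with hd3
  have hk2 : d2.keys = ['b', 'a', 'l', 'o', 'n'] := by
    rw [hd2, PySem.Dict.keys_insert_of_contains, hkeys]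
    rw [PySem.Dict.contains_eq_decide_mem_keys, hkeys]; decide
  have hk3 : d3.keys = ['b', 'a', 'l', 'o', 'n'] := by
    rw [hd3, PySem.Dict.keys_insert_of_contains, hk2]
    rw [PySem.Dict.contains_eq_decide_mem_keys, hk2]; decide
  have hnd3 : d3.keys.Nodup := by rw [hk3]; decide
  have hg3 : ∀ c, d3.getD c 0 =
      if c = 'o' then PySem.Int.floordiv (d1.getD 'o' 0) 2
      else if c = 'l' then PySem.Int.floordiv (d1.getD 'l' 0) 2
      else d1.getD c 0 := by
    intro c
    rw [hd3, PySem.Dict.getD_insert, hd2, PySem.Dict.getD_insert, PySem.Dict.getD_insert]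
    by_cases h1 : c = 'o' <;> by_cases h2 : c = 'l' <;> simp [h1, h2]
  have hvals : d3.values = ['b', 'a', 'l', 'o', 'n'].map (fun c => d3.getD c 0) := by
    rw [PySem.Dict.values_eq_map_keys d3 hnd3 0, hk3]
  show ((PySem.List.min? d3.values fun y => y).getD 0) = _
  rw [hvals]
  simp only [List.map_cons, List.map_nil]
  rw [PySem.List.min?_id_cons]
  simp only [Option.getD_some, List.foldl_cons, List.foldl_nil]
  rw [hg3 'b', hg3 'a', hg3 'l', hg3 'o', hg3 'n']
  rw [hget 'b' (by decide), hget 'a' (by decide), hget 'l' (by decide),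
    hget 'o' (by decide), hget 'n' (by decide)]
  simp [pvM, hl]

-- feasibility of k is exactly k ≤ pvM text
theorem pvFeasible_iff (text : String) (k : Int) :
    pvFeasible text k = true ↔ k ≤ pvM text := by
  unfold pvFeasible pvM
  simp only [List.all_cons, List.all_nil, Bool.and_true, Bool.and_eq_true, decide_eq_true_eq]
  rw [pv_count_single text 'b' "b" rfl, pv_count_single text 'a' "a" rfl,
      pv_count_single text 'l' "l" rfl, pv_count_single text 'o' "o" rfl,
      pv_count_single text 'n' "n" rfl]
  rw [PySem.Int.floordiv_eq_ediv_of_pos (show (0:Int) < 2 by norm_num),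
      PySem.Int.floordiv_eq_ediv_of_pos (show (0:Int) < 2 by norm_num)]
  omega

-- binary-search correctness: if lo ≤ m ≤ hi and feasibility is "≤ m", the search returns m
theorem pvSearch_eq (text : String) (m : Int)
    (hF : ∀ k, pvFeasible text k = true ↔ k ≤ m) :
    ∀ (n : Nat) (lo hi : Int), (hi - lo).toNat = n → lo ≤ m → m ≤ hi →
      pvSearch text lo hi = m := by
  intro n
  induction n using Nat.strong_induction_on with
  | _ n ih =>
    intro lo hi hn hlo hhi
    rw [pvSearch]
    by_cases h : lo < hi
    · rw [dif_pos h]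
      have hb := PySem.Int.floordiv_two_mid_bounds (lo := lo + 1) (hi := hi) (by omega)
      have heq : lo + 1 + hi = lo + hi + 1 := by ring
      rw [heq] at hb
      set mid := PySem.Int.floordiv (lo + hi + 1) 2 with hmid
      by_cases hf : pvFeasible text mid = true
      · rw [if_pos hf]
        have hm : mid ≤ m := (hF mid).mp hf
        exact ih (hi - mid).toNat (by omega) mid hi rfl hm hhi
      · rw [if_neg hf]
        have hm : ¬ mid ≤ m := fun hc => hf ((hF mid).mpr hc)
        exact ih (mid - 1 - lo).toNat (by omega) lo (mid - 1) rfl hlo (by omega)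
    · rw [dif_neg h]; omega

-- ===== VERDICT (by name: the statement is the Claim_ definition above) =====
theorem maxNumberOfBalloons2_spec : Claim_equal_maxNumberOfBalloons2 := by
  intro text _
  unfold Spec_maxNumberOfBalloons2 maxNumberOfBalloons2_alt
  rw [pvA_eq_pvM]
  have h0 : 0 ≤ pvM text := by
    unfold pvM
    rw [PySem.Int.floordiv_eq_ediv_of_pos (show (0:Int) < 2 by norm_num),
        PySem.Int.floordiv_eq_ediv_of_pos (show (0:Int) < 2 by norm_num)]
    have hb : (0 : Int) ≤ text.toList.count 'b' := Int.natCast_nonneg _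
    have ha : (0 : Int) ≤ text.toList.count 'a' := Int.natCast_nonneg _
    have hl : (0 : Int) ≤ text.toList.count 'l' := Int.natCast_nonneg _
    have ho : (0 : Int) ≤ text.toList.count 'o' := Int.natCast_nonneg _
    have hn : (0 : Int) ≤ text.toList.count 'n' := Int.natCast_nonneg _
    omega
  have hhi : pvM text ≤ (PySem.Str.len text : Int) := by
    have hcb : text.toList.count 'b' ≤ text.toList.length := List.count_le_length
    have hlen : PySem.Str.len text = text.toList.length := by
      simp [PySem.Str.len_eq]
    unfold pvM
    calc min (min (min (min (text.toList.count 'b' : Int) (text.toList.count 'a' : Int))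
          (PySem.Int.floordiv (text.toList.count 'l' : Int) 2))
          (PySem.Int.floordiv (text.toList.count 'o' : Int) 2))
          (text.toList.count 'n' : Int) ≤ (text.toList.count 'b' : Int) := by
            exact le_trans (min_le_left _ _)
              (le_trans (min_le_left _ _) (le_trans (min_le_left _ _) (min_le_left _ _)))
      _ ≤ (PySem.Str.len text : Int) := by rw [hlen]; exact_mod_cast hcb
  exact (pvSearch_eq text (pvM text) (pvFeasible_iff text) _ 0 _ rfl h0 hhi).symm
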